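-- pv_equiv track=rewrite | github.com/imseano/9x9Sudoku | test.py | ifdup
-- ===== SOURCE A (Python) =====
-- def ifdup(array):
--     #create dictionary exist
--     exist = {}
--     #duplicate list to store positions
--     dup = []
--     for i, num in enumerate(array):
--         #set !=0 since our placeholders are 0
--         if num !=0:
--             #if the number exists in the dictionary append to duplicate list with its positions
--             if num in exist:
--                 dup.append(i)
--                 dup.append(exist[num])
--             else:
--                 exist[num] = i
--     return dup
-- ===== SOURCE B (Python) =====
-- def ifdup(array):
--     # Pass 1: record only the FIRST index of each nonzero value (setdefault never updates).
--     first = {}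
--     for i, num in enumerate(array):
--         if num != 0:
--             first.setdefault(num, i)
--     # Pass 2: every position that is not the first occurrence of its value is a duplicate;
--     # append its index, then the first-occurrence index (exactly A's append order).
--     dup = []
--     for i, num in enumerate(array):
--         if num != 0 and first[num] != i:
--             dup.append(i)
--             dup.append(first[num])
--     return dup
-- ===== Notes on version B (the rewrite author's own statement) =====
-- stated objective: alternative
-- what changed: Replaces A's single interleaved loop (dict lookup deciding between append and insert while the dict is still growing) by two independent passes: one pass builds the complete first-occurrence index map with setdefault, then a second pass emits every non-first-occurrence position against that finished map.
import Mathlib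
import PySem

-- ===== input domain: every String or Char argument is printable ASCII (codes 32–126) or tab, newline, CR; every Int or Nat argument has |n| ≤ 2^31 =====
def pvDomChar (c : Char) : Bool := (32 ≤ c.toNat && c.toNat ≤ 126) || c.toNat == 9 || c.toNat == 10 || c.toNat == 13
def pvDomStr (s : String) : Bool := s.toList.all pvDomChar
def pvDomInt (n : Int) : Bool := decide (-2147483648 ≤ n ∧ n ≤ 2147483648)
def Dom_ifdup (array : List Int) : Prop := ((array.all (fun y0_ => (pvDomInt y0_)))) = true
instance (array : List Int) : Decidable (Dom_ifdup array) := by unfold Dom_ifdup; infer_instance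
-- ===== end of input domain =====

-- B is an alternative decomposition: two independent passes (build the complete first-occurrence
-- map first, then emit) instead of A's single loop that looks up and grows the dict interleaved.

-- ===== PORT A =====
-- one loop over enumerate(array); state = (exist dict, dup list)
def ifdup (array : List Int) : List Int :=
  ((PySem.List.enumerate array).foldl
    (fun (st : PySem.Dict Int Int × List Int) (p : Int × Int) =>
      if p.2 ≠ 0 then
        match st.1.get? p.2 with            -- 'if num in exist' and 'exist[num]' in one lookup
        | some j => (st.1, st.2 ++ [p.1, j])
        | none   => (st.1.insert p.2 p.1, st.2)
      else st)
    (PySem.Dict.empty, ([] : List Int))).2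

-- ===== PORT B =====
-- pass 1: first-occurrence indices via setdefault; pass 2: emit non-first occurrences.
-- 'first[num]' is ported as getD _ 0: the key is always present there (num ≠ 0 was seen in pass 1).
def ifdup_alt (array : List Int) : List Int :=
  let first := (PySem.List.enumerate array).foldl
    (fun (d : PySem.Dict Int Int) (p : Int × Int) =>
      if p.2 ≠ 0 then PySem.Dict.setdefault d p.2 p.1 else d)
    PySem.Dict.empty
  (PySem.List.enumerate array).foldl
    (fun (acc : List Int) (p : Int × Int) =>
      if p.2 ≠ 0 ∧ first.getD p.2 0 ≠ p.1 then acc ++ [p.1, first.getD p.2 0] else acc)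
    []

-- ===== PRECONDITION & SPEC =====
def Spec_ifdup (array : List Int) (out : List Int) : Prop := out = ifdup_alt array
instance (array : List Int) (out : List Int) : Decidable (Spec_ifdup array out) := by unfold Spec_ifdup; infer_instance

-- ===== CLAIM (what is proved, stated in full; the proofs are below) =====
def Claim_equal_ifdup : Prop := ∀ (array : List Int), Dom_ifdup array → Spec_ifdup array (ifdup array)

-- ===== LEMMAS AND PROOFS =====

-- proof-local names for the two loop bodies and the first pass
def pvStepA (st : PySem.Dict Int Int × List Int) (p : Int × Int) : PySem.Dict Int Int × List Int :=
  if p.2 ≠ 0 then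
    match st.1.get? p.2 with
    | some j => (st.1, st.2 ++ [p.1, j])
    | none   => (st.1.insert p.2 p.1, st.2)
  else st

def pvFirst (l : List (Int × Int)) (d : PySem.Dict Int Int) : PySem.Dict Int Int :=
  l.foldl (fun (d : PySem.Dict Int Int) (p : Int × Int) =>
    if p.2 ≠ 0 then PySem.Dict.setdefault d p.2 p.1 else d) d

def pvStepB (F : PySem.Dict Int Int) (acc : List Int) (p : Int × Int) : List Int :=
  if p.2 ≠ 0 ∧ F.getD p.2 0 ≠ p.1 then acc ++ [p.1, F.getD p.2 0] else acc

lemma pv_sd_contains (d : PySem.Dict Int Int) (k v : Int) (h : d.contains k = true) :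
    PySem.Dict.setdefault d k v = d := by
  simp [PySem.Dict.setdefault, h]

lemma pv_sd_not_contains (d : PySem.Dict Int Int) (k v : Int) (h : d.contains k = false) :
    PySem.Dict.setdefault d k v = d.insert k v := by
  simp [PySem.Dict.setdefault, PySem.Dict.insert, h]

-- setdefault never changes an existing binding; the whole first pass preserves it
lemma pv_first_mono (l : List (Int × Int)) (d : PySem.Dict Int Int) (k j : Int)
    (h : d.get? k = some j) : (pvFirst l d).get? k = some j := by
  induction l generalizing d with
  | nil => exact h
  | cons p t ih =>
    show (pvFirst t (if p.2 ≠ 0 then PySem.Dict.setdefault d p.2 p.1 else d)).get? k = some j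
    by_cases hz : p.2 ≠ 0
    · rw [if_pos hz]
      cases hc : d.contains p.2 with
      | false =>
        rw [pv_sd_not_contains d p.2 p.1 hc]
        apply ih
        by_cases hk : k = p.2
        · exfalso; subst hk
          rw [PySem.Dict.contains_eq_isSome_get?, h] at hc; simp at hc
        · rw [PySem.Dict.get?_insert_of_ne d p.1 hk]; exact h
      | true =>
        rw [pv_sd_contains d p.2 p.1 hc]; exact ih d h
    · rw [if_neg hz]; exact ih d h

-- the central invariant: A's remaining loop from state (d, acc) equals B's second pass over the
-- same suffix against the finished map pvFirst l d, provided d never maps a value of l to its own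
-- index (hd) and the indices in l are pairwise distinct (hl)
lemma pv_main (l : List (Int × Int)) (d : PySem.Dict Int Int) (acc : List Int)
    (hd : ∀ p ∈ l, ∀ j, d.get? p.2 = some j → j ≠ p.1)
    (hl : l.Pairwise (fun p q => p.1 ≠ q.1)) :
    (l.foldl pvStepA (d, acc)).2 = l.foldl (pvStepB (pvFirst l d)) acc := by
  induction l generalizing d acc with
  | nil => rfl
  | cons p t ih =>
    have hlt : t.Pairwise (fun p q => p.1 ≠ q.1) := hl.tail
    have hlh : ∀ q ∈ t, p.1 ≠ q.1 := fun q hq => List.rel_of_pairwise_cons hl hq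
    by_cases hz : p.2 ≠ 0
    · rcases hg : d.get? p.2 with _ | j
      · -- first occurrence: A inserts, B skips (first[p.2] = p.1)
        have hc : d.contains p.2 = false := by
          rw [PySem.Dict.contains_eq_isSome_get?, hg]; rfl
        have hF : pvFirst (p :: t) d = pvFirst t (d.insert p.2 p.1) := by
          show pvFirst t (if p.2 ≠ 0 then PySem.Dict.setdefault d p.2 p.1 else d) = _
          rw [if_pos hz, pv_sd_not_contains d p.2 p.1 hc]
        have hget : (pvFirst (p :: t) d).get? p.2 = some p.1 := by
          rw [hF]; exact pv_first_mono _ _ _ _ (PySem.Dict.get?_insert_self _ _ _)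
        have hgetD : (pvFirst (p :: t) d).getD p.2 0 = p.1 :=
          PySem.Dict.getD_of_get?_eq_some _ 0 hget
        simp only [List.foldl_cons, pvStepA, pvStepB, hz, hg, hgetD,
          ne_eq, not_true_eq_false, and_false]
        rw [hF]
        apply ih
        · intro q hq j hj
          by_cases hk : q.2 = p.2
          · rw [hk, PySem.Dict.get?_insert_self] at hj
            cases hj; exact hlh q hq
          · rw [PySem.Dict.get?_insert_of_ne d p.1 hk] at hj
            exact hd q (List.mem_cons_of_mem _ hq) j hj
        · exact hlt
      · -- repeat occurrence: A appends [i, j]; B appends [i, first[p.2]] with first[p.2] = j ≠ i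
        have hc : d.contains p.2 = true := by
          rw [PySem.Dict.contains_eq_isSome_get?, hg]; rfl
        have hF : pvFirst (p :: t) d = pvFirst t d := by
          show pvFirst t (if p.2 ≠ 0 then PySem.Dict.setdefault d p.2 p.1 else d) = _
          rw [if_pos hz, pv_sd_contains d p.2 p.1 hc]
        have hget : (pvFirst (p :: t) d).get? p.2 = some j := by
          rw [hF]; exact pv_first_mono _ _ _ _ hg
        have hgetD : (pvFirst (p :: t) d).getD p.2 0 = j :=
          PySem.Dict.getD_of_get?_eq_some _ 0 hget
        have hne : j ≠ p.1 := hd p List.mem_cons_self j hg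
        simp only [List.foldl_cons, pvStepA, pvStepB, hz, hg, if_pos, hgetD, hne,
          ne_eq, not_false_eq_true, and_true, if_pos]
        rw [hF]
        apply ih
        · intro q hq k hk; exact hd q (List.mem_cons_of_mem _ hq) k hk
        · exact hlt
    · -- num == 0: both sides skip
      have hF : pvFirst (p :: t) d = pvFirst t d := by
        show pvFirst t (if p.2 ≠ 0 then PySem.Dict.setdefault d p.2 p.1 else d) = _
        rw [if_neg hz]
      simp only [List.foldl_cons, pvStepA, pvStepB, hz, if_neg, false_and,
        not_false_eq_true]
      rw [hF]
      apply ih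
      · intro q hq k hk; exact hd q (List.mem_cons_of_mem _ hq) k hk
      · exact hlt

lemma pv_enum_pairwise (array : List Int) :
    (PySem.List.enumerate array 0).Pairwise (fun p q => p.1 ≠ q.1) := by
  have h : ((PySem.List.enumerate array 0).map (·.1)).Nodup := by
    rw [PySem.List.map_fst_enumerate]
    exact PySem.List.nodup_pyRange_one _ _
  rw [List.nodup_iff_pairwise_ne, List.pairwise_map] at h
  exact h

-- ===== VERDICT (by name: the statement is the Claim_ definition above) =====
theorem ifdup_spec : Claim_equal_ifdup := by
  intro array _
  exact pv_main (PySem.List.enumerate array 0) PySem.Dict.empty []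
    (by intro p _ j hj; rw [PySem.Dict.get?_empty] at hj; cases hj)
    (pv_enum_pairwise array)
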